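-- pv_equiv track=rewrite | github.com/m-hahn/infolocality | experiments.py | num_discontinuities
-- ===== SOURCE A (Python) =====
-- def num_discontinuities(perm):
--     set1 = {0, 1, 2, 3}
--     set2 = {4, 5, 6, 7}
--     d = 0
--     which = perm[0] in set1
--     maybe = False
--     for i in perm:
--         if (i in set1) != which:  # still in same morpheme
--             d += 1
--             which = i in set1
--     return d
-- ===== SOURCE B (Python) =====
-- def num_discontinuities(perm):
--     set1 = {0, 1, 2, 3}
--     n = len(perm)
--     i = 0
--     runs = 0
--     while i < n:
--         k = perm[i] in set1
--         while i < n and (perm[i] in set1) == k: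
--             i += 1
--         runs += 1
--     return runs - 1
-- ===== Notes on version B (the rewrite author's own statement) =====
-- stated objective: alternative
-- what changed: Replaces A's per-element stateful loop (which updates a 'which' flag and increments on each flip) by run-counting: a nested inner loop skips each maximal run of same-membership elements, the outer loop counts the runs, and the result is runs - 1.
import Mathlib
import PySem

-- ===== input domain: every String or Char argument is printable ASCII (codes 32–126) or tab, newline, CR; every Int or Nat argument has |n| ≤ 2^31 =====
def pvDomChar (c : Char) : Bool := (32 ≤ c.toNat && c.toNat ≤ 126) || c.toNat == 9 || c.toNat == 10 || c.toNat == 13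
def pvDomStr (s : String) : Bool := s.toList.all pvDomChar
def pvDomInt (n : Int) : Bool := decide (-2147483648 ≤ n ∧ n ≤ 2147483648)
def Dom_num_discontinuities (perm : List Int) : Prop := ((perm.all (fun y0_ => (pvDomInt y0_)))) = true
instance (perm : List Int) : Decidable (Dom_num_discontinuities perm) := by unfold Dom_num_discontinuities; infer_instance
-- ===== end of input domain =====

-- B counts maximal same-membership runs with a nested skip loop and returns runs - 1,
-- instead of A's per-element flag-updating loop; return values proved equal on all non-empty lists.

-- ===== PORT A =====
-- A: stateful loop with a 'which' flag, counting flips; indexing the first element raises on an empty list.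
def num_discontinuities (perm : List Int) : Int :=
  let set1 : List Int := [0, 1, 2, 3]
  match PySem.List.pyGet? perm 0 with
  | none => 0   -- IndexError in Python; excluded by Pre_
  | some x0 =>
    (perm.foldl
      (fun (s : Int × Bool) i =>
        if (set1.contains i) != s.2 then (s.1 + 1, set1.contains i) else s)
      (0, set1.contains x0)).1

-- ===== PORT B =====
-- B: run counting. Inner while loop (pvSkip) advances i past the maximal run whose
-- membership in {0,1,2,3} equals k; outer loop (pvOuter) counts runs; result is runs - 1.
def pvSkip (perm : List Int) (k : Bool) (i : Nat) : Nat :=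
  if h : i < perm.length ∧ ((([0, 1, 2, 3] : List Int).contains (perm.getD i 0)) == k) then
    pvSkip perm k (i + 1)
  else i
termination_by perm.length - i
decreasing_by omega

theorem pvSkip_le (perm : List Int) (k : Bool) (i : Nat) : i ≤ pvSkip perm k i := by
  induction i using pvSkip.induct perm k with
  | case1 i h ih => rw [pvSkip, dif_pos h]; omega
  | case2 i h => rw [pvSkip, dif_neg h]

theorem pvSkip_gt (perm : List Int) (i : Nat) (h : i < perm.length) :
    i < pvSkip perm (([0, 1, 2, 3] : List Int).contains (perm.getD i 0)) i := by
  rw [pvSkip, dif_pos ⟨h, by simp⟩]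
  have := pvSkip_le perm (([0, 1, 2, 3] : List Int).contains (perm.getD i 0)) (i + 1)
  omega

def pvOuter (perm : List Int) (i : Nat) (runs : Int) : Int :=
  if h : i < perm.length then
    pvOuter perm (pvSkip perm (([0, 1, 2, 3] : List Int).contains (perm.getD i 0)) i) (runs + 1)
  else runs
termination_by perm.length - i
decreasing_by have := pvSkip_gt perm i h; omega

def num_discontinuities_alt (perm : List Int) : Int :=
  pvOuter perm 0 0 - 1

-- ===== PRECONDITION & SPEC =====
-- Pre_ excludes only the empty list, on which A raises IndexError indexing the first element.
def Pre_num_discontinuities (perm : List Int) : Prop := perm ≠ []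
instance (perm : List Int) : Decidable (Pre_num_discontinuities perm) := by
  unfold Pre_num_discontinuities; infer_instance
def pvWitness_num_discontinuities : List Int := ([0, 4, 1])

def Spec_num_discontinuities (perm : List Int) (out : Int) : Prop := out = num_discontinuities_alt perm
instance (perm : List Int) (out : Int) : Decidable (Spec_num_discontinuities perm out) := by unfold Spec_num_discontinuities; infer_instance

-- ===== CLAIM (what is proved, stated in full; the proofs are below) =====
def Claim_equal_num_discontinuities : Prop := ∀ (perm : List Int), Dom_num_discontinuities perm → Pre_num_discontinuities perm → Spec_num_discontinuities perm (num_discontinuities perm)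

-- ===== LEMMAS AND PROOFS =====

def pvMem (x : Int) : Bool := ([0, 1, 2, 3] : List Int).contains x

-- transition count of A's loop, over the membership sequence
def pvTrans (b : Bool) : List Bool → Int
  | [] => 0
  | c :: cs => (if c != b then 1 else 0) + pvTrans c cs

-- number of maximal same-membership runs, list-level
def pvRunCount : List Int → Int
  | [] => 0
  | x :: xs => 1 + pvRunCount (xs.dropWhile (fun y => pvMem y == pvMem x))
termination_by l => l.length
decreasing_by
  have := List.length_dropWhile_le (fun y => pvMem y == pvMem x) xs
  simp; omega

theorem pvA_fold (set1 : List Int) (xs : List Int) (d : Int) (b : Bool) :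
    (xs.foldl
      (fun (s : Int × Bool) i =>
        if (set1.contains i) != s.2 then (s.1 + 1, set1.contains i) else s)
      (d, b)).1 = d + pvTrans b (xs.map (fun x => set1.contains x)) := by
  induction xs generalizing d b with
  | nil => simp [pvTrans]
  | cons x xs ih =>
    rw [List.foldl_cons]
    simp only [List.map, pvTrans]
    by_cases h : set1.contains x = b
    · have hb : (set1.contains x != b) = false := by rw [h]; simp
      simp only [hb, Bool.false_eq_true, if_false]
      rw [ih, h]; ring
    · have hb : (set1.contains x != b) = true := by
        cases hx : set1.contains x <;> cases hbb : b <;> simp_all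
      simp only [hb, if_true]
      rw [ih]; ring

theorem pvTrans_runCount (xs : List Int) (b : Bool) :
    pvTrans b (xs.map pvMem) = pvRunCount (xs.dropWhile (fun y => pvMem y == b)) := by
  induction xs generalizing b with
  | nil => simp [pvTrans, pvRunCount]
  | cons x xs ih =>
    simp only [List.map, pvTrans, List.dropWhile]
    by_cases h : pvMem x = b
    · have h1 : (pvMem x != b) = false := by rw [h]; simp
      have h2 : (pvMem x == b) = true := by rw [h]; simp
      simp only [h1, h2, Bool.false_eq_true, if_false]
      rw [ih, h]; ring
    · have h1 : (pvMem x != b) = true := by cases hx : pvMem x <;> cases hb : b <;> simp_all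
      have h2 : (pvMem x == b) = false := by cases hx : pvMem x <;> cases hb : b <;> simp_all
      simp only [h1, h2, if_true]
      rw [pvRunCount, ih]

theorem pvDropTake {α : Type} (p : α → Bool) (l : List α) :
    l.drop (l.takeWhile p).length = l.dropWhile p := by
  induction l with
  | nil => rfl
  | cons x xs ih =>
    by_cases h : p x
    · simp [List.takeWhile, List.dropWhile, h, ih]
    · simp [List.takeWhile, List.dropWhile, h]

theorem pvSkip_eq (perm : List Int) (k : Bool) (i : Nat) :
    pvSkip perm k i = i + ((perm.drop i).takeWhile (fun y => pvMem y == k)).length := by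
  induction i using pvSkip.induct perm k with
  | case1 i h ih =>
    obtain ⟨hlt, hk⟩ := h
    have hget : perm.getD i 0 = perm[i] := List.getD_eq_getElem perm 0 hlt
    have hdrop : perm.drop i = perm[i] :: perm.drop (i + 1) := List.drop_eq_getElem_cons hlt
    have hk' : (pvMem perm[i] == k) = true := by unfold pvMem; rw [← hget]; exact hk
    rw [pvSkip, dif_pos ⟨hlt, hk⟩, ih, hdrop]
    simp [List.takeWhile, hk']
    omega
  | case2 i h =>
    rw [pvSkip, dif_neg h]
    by_cases hlt : i < perm.length
    · have hget : perm.getD i 0 = perm[i] := List.getD_eq_getElem perm 0 hlt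
      have hdrop : perm.drop i = perm[i] :: perm.drop (i + 1) := List.drop_eq_getElem_cons hlt
      have hk : ((([0, 1, 2, 3] : List Int).contains (perm.getD i 0)) == k) = false := by
        cases hcc : ((([0, 1, 2, 3] : List Int).contains (perm.getD i 0)) == k)
        · rfl
        · exact absurd ⟨hlt, hcc⟩ h
      have hk' : (pvMem perm[i] == k) = false := by unfold pvMem; rw [← hget]; exact hk
      rw [hdrop]
      simp [List.takeWhile, hk']
    · have hnil : perm.drop i = [] := List.drop_eq_nil_of_le (by omega)
      simp [hnil]

theorem pvOuter_eq (perm : List Int) (i : Nat) (runs : Int) :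
    pvOuter perm i runs = runs + pvRunCount (perm.drop i) := by
  induction i, runs using pvOuter.induct perm with
  | case1 i runs h ih =>
    rw [pvOuter, dif_pos h, ih]
    have hget : perm.getD i 0 = perm[i] := List.getD_eq_getElem perm 0 h
    have hdrop : perm.drop i = perm[i] :: perm.drop (i + 1) := List.drop_eq_getElem_cons h
    have hskip : pvSkip perm (([0, 1, 2, 3] : List Int).contains (perm.getD i 0)) i
        = i + 1 + ((perm.drop (i + 1)).takeWhile (fun y => pvMem y == pvMem perm[i])).length := by
      have hc : (([0, 1, 2, 3] : List Int).contains (perm.getD i 0)) = pvMem perm[i] := by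
        unfold pvMem; rw [hget]
      rw [pvSkip_eq, hc, hdrop]
      simp [List.takeWhile]
      omega
    rw [hskip]
    have hdd : perm.drop (i + 1 + ((perm.drop (i + 1)).takeWhile (fun y => pvMem y == pvMem perm[i])).length)
        = (perm.drop (i + 1)).dropWhile (fun y => pvMem y == pvMem perm[i]) := by
      rw [← pvDropTake (fun y => pvMem y == pvMem perm[i]) (perm.drop (i + 1))]
      rw [← List.drop_drop]
    rw [hdd]
    conv_rhs => rw [hdrop, pvRunCount]
    ring
  | case2 i runs h =>
    rw [pvOuter, dif_neg h]
    have hnil : perm.drop i = [] := List.drop_eq_nil_of_le (by omega)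
    simp [hnil, pvRunCount]

-- ===== VERDICT (by name: the statement is the Claim_ definition above) =====
theorem num_discontinuities_spec : Claim_equal_num_discontinuities := by
  intro perm _ hpre
  unfold Spec_num_discontinuities num_discontinuities num_discontinuities_alt
  cases hp : perm with
  | nil => exact absurd hp hpre
  | cons x xs =>
    have hget : PySem.List.pyGet? (x :: xs) (0 : Int) = some x := by
      simp [PySem.List.pyGet?, PySem.List.pyIdx?]
    simp only [hget]
    rw [pvA_fold, pvOuter_eq]
    have h0 : (x :: xs).drop 0 = x :: xs := rfl
    rw [h0, pvRunCount]
    simp only [List.map]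
    have hx : (([0, 1, 2, 3] : List Int).contains x) = pvMem x := rfl
    have hm : (fun y => ([0, 1, 2, 3] : List Int).contains y) = pvMem := rfl
    rw [hx, hm]
    have hpeel : pvTrans (pvMem x) (pvMem x :: xs.map pvMem)
        = (if (pvMem x != pvMem x) then (1 : Int) else 0) + pvTrans (pvMem x) (xs.map pvMem) := rfl
    rw [hpeel, pvTrans_runCount]
    simp
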